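-- pv_equiv track=rewrite | github.com/Himpq/Nexora | NexoraLearning/core/booksproc/question.py | _render_question_items_xml
-- ===== SOURCE A (Python) =====
-- from typing import Any, Callable, Dict, List, Mapping, Tuple
--
-- def _xml_escape(value: Any) -> str:
--     text = str(value or "")
--     return (
--         text.replace("&", "&amp;")
--         .replace("<", "&lt;")
--         .replace(">", "&gt;")
--         .replace('"', "&quot;")
--         .replace("'", "&apos;")
--     )
--
-- def _render_question_items_xml(items: List[Dict[str, str]]) -> str:
--     if not items:
--         return "  <question_items></question_items>"
--     blocks: List[str] = []
--     for item in items: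
--         blocks.append(
--             "    <question_item>\n"
--             f"      <question_title>{_xml_escape(item.get('question_title') or '')}</question_title>\n"
--             f"      <question_difficulty>{_xml_escape(item.get('question_difficulty') or '')}</question_difficulty>\n"
--             f"      <question_content>{_xml_escape(item.get('question_content') or '')}</question_content>\n"
--             f"      <question_hint>{_xml_escape(item.get('question_hint') or '')}</question_hint>\n"
--             f"      <question_answer>{_xml_escape(item.get('question_answer') or '')}</question_answer>\n"
--             "    </question_item>"
--         )
--     return "  <question_items>\n" + "\n".join(blocks) + "\n  </question_items>"
-- ===== SOURCE B (Python) =====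
-- _FIELDS = ("question_title", "question_difficulty", "question_content", "question_hint", "question_answer")
--
-- _ESCAPES = {"&": "&amp;", "<": "&lt;", ">": "&gt;", '"': "&quot;", "'": "&apos;"}
--
--
-- def _xml_escape(value):
--     text = str(value or "")
--     return "".join(_ESCAPES.get(ch, ch) for ch in text)
--
--
-- def _render_question_items_xml(items):
--     if not items:
--         return "  <question_items></question_items>"
--     blocks = []
--     for item in items:
--         lines = ["    <question_item>"]
--         for tag in _FIELDS:
--             lines.append(f"      <{tag}>{_xml_escape(item.get(tag) or '')}</{tag}>")
--         lines.append("    </question_item>")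
--         blocks.append("\n".join(lines))
--     return "  <question_items>\n" + "\n".join(blocks) + "\n  </question_items>"
-- ===== Notes on version B (the rewrite author's own statement) =====
-- stated objective: idiomatic
-- what changed: B renders the five fields table-driven (a field list, per-line build, join) instead of A's hardcoded block f-string, and escapes with a single per-character table pass instead of A's five sequential str.replace passes.
import Mathlib
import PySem

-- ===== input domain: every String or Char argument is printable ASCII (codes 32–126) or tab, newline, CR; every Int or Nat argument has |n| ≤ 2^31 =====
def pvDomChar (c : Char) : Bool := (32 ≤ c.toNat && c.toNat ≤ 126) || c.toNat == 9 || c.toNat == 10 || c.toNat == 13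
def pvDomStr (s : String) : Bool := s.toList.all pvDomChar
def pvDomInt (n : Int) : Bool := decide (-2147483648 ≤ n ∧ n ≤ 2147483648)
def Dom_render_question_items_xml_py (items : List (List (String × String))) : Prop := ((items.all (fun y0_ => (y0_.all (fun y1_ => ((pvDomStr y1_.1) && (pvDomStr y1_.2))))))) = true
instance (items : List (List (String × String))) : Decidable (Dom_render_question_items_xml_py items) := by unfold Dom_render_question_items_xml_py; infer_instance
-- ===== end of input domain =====

-- B renders the five question fields table-driven with a single-pass per-char XML escape,
-- instead of A's hardcoded block f-string and five sequential .replace passes (objective: idiomatic).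


-- ===== PORT A =====
-- _xml_escape: five sequential .replace passes (str(value or "") is the identity on a str argument)
def xmlEscapeA (value : String) : String :=
  PySem.Str.replace
    (PySem.Str.replace
      (PySem.Str.replace
        (PySem.Str.replace
          (PySem.Str.replace value "&" "&amp;")
          "<" "&lt;")
        ">" "&gt;")
      "\"" "&quot;")
    "'" "&apos;"

-- one hardcoded block per item, exactly A's f-string concatenation; item.get(k) or '' = getD "" (empty stays empty)
def blockA (item : List (String × String)) : String :=
  "    <question_item>\n" ++
  "      <question_title>" ++ xmlEscapeA (PySem.Dict.getD ⟨item⟩ "question_title" "") ++ "</question_title>\n" ++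
  "      <question_difficulty>" ++ xmlEscapeA (PySem.Dict.getD ⟨item⟩ "question_difficulty" "") ++ "</question_difficulty>\n" ++
  "      <question_content>" ++ xmlEscapeA (PySem.Dict.getD ⟨item⟩ "question_content" "") ++ "</question_content>\n" ++
  "      <question_hint>" ++ xmlEscapeA (PySem.Dict.getD ⟨item⟩ "question_hint" "") ++ "</question_hint>\n" ++
  "      <question_answer>" ++ xmlEscapeA (PySem.Dict.getD ⟨item⟩ "question_answer" "") ++ "</question_answer>\n" ++
  "    </question_item>"

def render_question_items_xml_py (items : List (List (String × String))) : String :=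
  if items = [] then "  <question_items></question_items>"
  else "  <question_items>\n" ++ PySem.Str.join "\n" (items.map blockA) ++ "\n  </question_items>"

-- ===== PORT B =====
-- per-char escape table (dict.get(ch, ch))
def escCharB (c : Char) : List Char :=
  if c = '&' then "&amp;".toList
  else if c = '<' then "&lt;".toList
  else if c = '>' then "&gt;".toList
  else if c = '"' then "&quot;".toList
  else if c = '\'' then "&apos;".toList
  else [c]

-- "".join(table.get(ch, ch) for ch in text): one pass over the characters
def xmlEscapeB (value : String) : String :=
  String.ofList (value.toList.flatMap escCharB)

def fieldsB : List String :=
  ["question_title", "question_difficulty", "question_content", "question_hint", "question_answer"]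

def lineB (item : List (String × String)) (tag : String) : String :=
  "      <" ++ tag ++ ">" ++ xmlEscapeB (PySem.Dict.getD ⟨item⟩ tag "") ++ "</" ++ tag ++ ">"

def blockB (item : List (String × String)) : String :=
  PySem.Str.join "\n"
    (["    <question_item>"] ++ fieldsB.map (lineB item) ++ ["    </question_item>"])

def render_question_items_xml_py_alt (items : List (List (String × String))) : String :=
  if items = [] then "  <question_items></question_items>"
  else "  <question_items>\n" ++ PySem.Str.join "\n" (items.map blockB) ++ "\n  </question_items>"

-- ===== PRECONDITION & SPEC =====
def Spec_render_question_items_xml_py (items : List (List (String × String))) (out : String) : Prop := out = render_question_items_xml_py_alt items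
instance (items : List (List (String × String))) (out : String) : Decidable (Spec_render_question_items_xml_py items out) := by unfold Spec_render_question_items_xml_py; infer_instance

-- ===== CLAIM (what is proved, stated in full; the proofs are below) =====
def Claim_equal_render_question_items_xml_py : Prop := ∀ (items : List (List (String × String))), Dom_render_question_items_xml_py items → Spec_render_question_items_xml_py items (render_question_items_xml_py items)

-- ===== LEMMAS AND PROOFS =====

-- a single-character replace is a per-character flatMap
theorem repl_go_single (c0 : Char) (new : List Char) :
    ∀ (l : List Char) (fuel : Nat) (acc : List Char), l.length ≤ fuel →
      PySem.Chars.replace.go [c0] new fuel l acc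
        = acc.reverse ++ l.flatMap (fun c => if c = c0 then new else [c]) := by
  intro l
  induction l with
  | nil =>
      intro fuel acc h
      cases fuel <;> simp [PySem.Chars.replace.go]
  | cons c t ih =>
      intro fuel acc h
      cases fuel with
      | zero => simp at h
      | succ n =>
          have hn : t.length ≤ n := by simpa using h
          simp only [PySem.Chars.replace.go]
          by_cases hc : c0 = c
          · subst hc
            rw [if_pos (by simp [List.isPrefixOf])]
            simp only [List.length_cons, List.length_nil, Nat.zero_add, List.drop_one,
              List.tail_cons]
            rw [ih n (new.reverse ++ acc) hn]
            simp
          · rw [if_neg (by simp [List.isPrefixOf, hc])]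
            rw [ih n (c :: acc) hn]
            simp [Ne.symm hc]

theorem replace_single (s : List Char) (c0 : Char) (new : List Char) :
    PySem.Chars.replace s [c0] new = s.flatMap (fun c => if c = c0 then new else [c]) := by
  simp [PySem.Chars.replace, repl_go_single c0 new s s.length [] le_rfl]

theorem escape_eq : xmlEscapeA = xmlEscapeB := by
  funext v
  rw [← String.toList_inj]
  simp only [xmlEscapeA, xmlEscapeB, PySem.Str.toList_replace, String.toList_ofList,
    show "&".toList = ['&'] from rfl, show "<".toList = ['<'] from rfl,
    show ">".toList = ['>'] from rfl, show "\"".toList = ['"'] from rfl,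
    show "'".toList = ['\''] from rfl,
    replace_single, List.flatMap_assoc]
  refine List.flatMap_congr (fun c _ => ?_)
  by_cases h1 : c = '&'
  · subst h1; decide
  by_cases h2 : c = '<'
  · subst h2; decide
  by_cases h3 : c = '>'
  · subst h3; decide
  by_cases h4 : c = '"'
  · subst h4; decide
  by_cases h5 : c = '\''
  · subst h5; decide
  simp [escCharB, h1, h2, h3, h4, h5]

set_option maxRecDepth 4000 in
set_option maxHeartbeats 1600000 in
theorem block_eq : blockA = blockB := by
  funext item
  rw [← String.toList_inj]
  simp only [blockA, blockB, escape_eq, fieldsB, lineB, List.map_cons, List.map_nil,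
    List.cons_append, List.nil_append, PySem.Str.toList_join, PySem.Chars.join,
    List.intercalate, List.intersperse, List.flatten, String.toList_append,
    show "    <question_item>\n".toList = [' ', ' ', ' ', ' ', '<', 'q', 'u', 'e', 's', 't', 'i', 'o', 'n', '_', 'i', 't', 'e', 'm', '>', '\n'] from rfl,
    show "    <question_item>".toList = [' ', ' ', ' ', ' ', '<', 'q', 'u', 'e', 's', 't', 'i', 'o', 'n', '_', 'i', 't', 'e', 'm', '>'] from rfl,
    show "    </question_item>".toList = [' ', ' ', ' ', ' ', '<', '/', 'q', 'u', 'e', 's', 't', 'i', 'o', 'n', '_', 'i', 't', 'e', 'm', '>'] from rfl,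
    show "\n".toList = ['\n'] from rfl,
    show "      <".toList = [' ', ' ', ' ', ' ', ' ', ' ', '<'] from rfl,
    show "</".toList = ['<', '/'] from rfl,
    show ">".toList = ['>'] from rfl,
    show "      <question_title>".toList = [' ', ' ', ' ', ' ', ' ', ' ', '<', 'q', 'u', 'e', 's', 't', 'i', 'o', 'n', '_', 't', 'i', 't', 'l', 'e', '>'] from rfl,
    show "</question_title>\n".toList = ['<', '/', 'q', 'u', 'e', 's', 't', 'i', 'o', 'n', '_', 't', 'i', 't', 'l', 'e', '>', '\n'] from rfl,
    show "question_title".toList = ['q', 'u', 'e', 's', 't', 'i', 'o', 'n', '_', 't', 'i', 't', 'l', 'e'] from rfl,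
    show "      <question_difficulty>".toList = [' ', ' ', ' ', ' ', ' ', ' ', '<', 'q', 'u', 'e', 's', 't', 'i', 'o', 'n', '_', 'd', 'i', 'f', 'f', 'i', 'c', 'u', 'l', 't', 'y', '>'] from rfl,
    show "</question_difficulty>\n".toList = ['<', '/', 'q', 'u', 'e', 's', 't', 'i', 'o', 'n', '_', 'd', 'i', 'f', 'f', 'i', 'c', 'u', 'l', 't', 'y', '>', '\n'] from rfl,
    show "question_difficulty".toList = ['q', 'u', 'e', 's', 't', 'i', 'o', 'n', '_', 'd', 'i', 'f', 'f', 'i', 'c', 'u', 'l', 't', 'y'] from rfl,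
    show "      <question_content>".toList = [' ', ' ', ' ', ' ', ' ', ' ', '<', 'q', 'u', 'e', 's', 't', 'i', 'o', 'n', '_', 'c', 'o', 'n', 't', 'e', 'n', 't', '>'] from rfl,
    show "</question_content>\n".toList = ['<', '/', 'q', 'u', 'e', 's', 't', 'i', 'o', 'n', '_', 'c', 'o', 'n', 't', 'e', 'n', 't', '>', '\n'] from rfl,
    show "question_content".toList = ['q', 'u', 'e', 's', 't', 'i', 'o', 'n', '_', 'c', 'o', 'n', 't', 'e', 'n', 't'] from rfl,
    show "      <question_hint>".toList = [' ', ' ', ' ', ' ', ' ', ' ', '<', 'q', 'u', 'e', 's', 't', 'i', 'o', 'n', '_', 'h', 'i', 'n', 't', '>'] from rfl,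
    show "</question_hint>\n".toList = ['<', '/', 'q', 'u', 'e', 's', 't', 'i', 'o', 'n', '_', 'h', 'i', 'n', 't', '>', '\n'] from rfl,
    show "question_hint".toList = ['q', 'u', 'e', 's', 't', 'i', 'o', 'n', '_', 'h', 'i', 'n', 't'] from rfl,
    show "      <question_answer>".toList = [' ', ' ', ' ', ' ', ' ', ' ', '<', 'q', 'u', 'e', 's', 't', 'i', 'o', 'n', '_', 'a', 'n', 's', 'w', 'e', 'r', '>'] from rfl,
    show "</question_answer>\n".toList = ['<', '/', 'q', 'u', 'e', 's', 't', 'i', 'o', 'n', '_', 'a', 'n', 's', 'w', 'e', 'r', '>', '\n'] from rfl,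
    show "question_answer".toList = ['q', 'u', 'e', 's', 't', 'i', 'o', 'n', '_', 'a', 'n', 's', 'w', 'e', 'r'] from rfl,
    List.append_assoc, List.append_eq, List.append_nil]

-- ===== VERDICT (by name: the statement is the Claim_ definition above) =====
theorem render_question_items_xml_py_spec : Claim_equal_render_question_items_xml_py := by
  intro items _
  unfold Spec_render_question_items_xml_py render_question_items_xml_py render_question_items_xml_py_alt
  rw [block_eq]
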